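-- pv_equiv track=rewrite | github.com/ehabich/climate-conversations | project/analysis/moral_found_dict_generator.py | swap_keys_values
-- ===== SOURCE A (Python) =====
-- def swap_keys_values(d):
--     swapped = {}
--     for key, value_list in d.items():
--         for value in value_list:
--             if value in swapped:
--                 if len(swapped[value]) < 30:
--                     swapped[value].append(key)
--                 else:
--                     pass
--             else:
--                 swapped[value] = [key]
--     return swapped
-- ===== SOURCE B (Python) =====
-- def swap_keys_values(d):
--     # Flatten the mapping into (key, value) occurrence pairs.
--     pairs = [(k, v) for k, vl in d.items() for v in vl]
--     # The distinct values, in first-encounter order.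
--     seen = list(dict.fromkeys(v for _, v in pairs))
--     # Group by value with a per-value scan over the pairs, keeping the first 30 keys.
--     return {v: [k for k, w in pairs if w == v][:30] for v in seen}
-- ===== Notes on version B (the rewrite author's own statement) =====
-- stated objective: alternative
-- what changed: B replaces A's incremental dict mutation with a flatten-then-group-by: it flattens d to (key, value) occurrence pairs, deduplicates the values in encounter order, and for each distinct value does a separate scan of the pair list collecting its keys, truncated to the first 30.
import Mathlib
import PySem

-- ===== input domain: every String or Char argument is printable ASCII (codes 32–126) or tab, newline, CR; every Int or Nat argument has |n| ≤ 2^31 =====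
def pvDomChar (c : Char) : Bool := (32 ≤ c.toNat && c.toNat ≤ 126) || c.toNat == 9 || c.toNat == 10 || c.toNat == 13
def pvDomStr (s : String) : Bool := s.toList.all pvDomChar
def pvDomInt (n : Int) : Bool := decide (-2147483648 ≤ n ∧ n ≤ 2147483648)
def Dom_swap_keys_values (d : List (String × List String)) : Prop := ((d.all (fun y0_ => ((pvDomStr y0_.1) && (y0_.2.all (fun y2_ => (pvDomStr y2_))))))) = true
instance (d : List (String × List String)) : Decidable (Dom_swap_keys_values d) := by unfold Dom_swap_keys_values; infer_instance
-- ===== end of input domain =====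

-- ===== PORT A =====
-- B inverts the dict by flatten-then-group-by (dedup the values, then one scan per distinct
-- value collecting its first 30 keys) instead of A's incremental dict mutation (objective: alternative).
def swapAStep (key : String) (sw : PySem.Dict String (List String)) (value : String) :
    PySem.Dict String (List String) :=
  if sw.contains value then
    (if (sw.getD value []).length < 30 then sw.insert value ((sw.getD value []) ++ [key]) else sw)
  else sw.insert value [key]

def swap_keys_values (d : List (String × List String)) : List (String × List String) :=
  (d.foldl (fun sw kv => kv.2.foldl (swapAStep kv.1) sw) PySem.Dict.empty).items

-- ===== PORT B =====
-- pairs = flattened (key, value) occurrences; seen = list(dict.fromkeys(values)) = PySem.List.dedup;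
-- the dict comprehension scans pairs once per distinct value and takes the first 30 keys ([:30] = take 30).
def swap_keys_values_alt (d : List (String × List String)) : List (String × List String) :=
  let pairs := d.flatMap (fun kv => kv.2.map (fun v => (kv.1, v)))
  let seen := PySem.List.dedup (pairs.map Prod.snd)
  seen.map (fun v => (v, ((pairs.filter (fun q => q.2 == v)).map Prod.fst).take 30))

-- ===== PRECONDITION & SPEC =====
def Spec_swap_keys_values (d : List (String × List String)) (out : List (String × List String)) : Prop := out = swap_keys_values_alt d
instance (d : List (String × List String)) (out : List (String × List String)) : Decidable (Spec_swap_keys_values d out) := by unfold Spec_swap_keys_values; infer_instance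

-- ===== CLAIM (what is proved, stated in full; the proofs are below) =====
def Claim_equal_swap_keys_values : Prop := ∀ (d : List (String × List String)), Dom_swap_keys_values d → Spec_swap_keys_values d (swap_keys_values d)

-- ===== LEMMAS AND PROOFS =====

def pvTrunc (p : String × List String) : String × List String := (p.1, p.2.take 30)

theorem pv_keys_eq (sA sB : PySem.Dict String (List String))
    (h : sA.items = sB.items.map pvTrunc) : sA.keys = sB.keys := by
  simp only [PySem.Dict.keys, h, List.map_map]
  rfl

theorem pv_step (k v : String) (sA sB : PySem.Dict String (List String))
    (hnd : sB.keys.Nodup) (h : sA.items = sB.items.map pvTrunc) :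
    (sB.modify v [] (fun ks => ks ++ [k])).keys.Nodup ∧
      (swapAStep k sA v).items = (sB.modify v [] (fun ks => ks ++ [k])).items.map pvTrunc := by
  have hkeys : sA.keys = sB.keys := pv_keys_eq sA sB h
  have hndA : sA.keys.Nodup := hkeys ▸ hnd
  have hcont : sA.contains v = sB.contains v := by
    rw [PySem.Dict.contains_eq_decide_mem_keys, PySem.Dict.contains_eq_decide_mem_keys, hkeys]
  have hmod : sB.modify v [] (fun ks => ks ++ [k]) = sB.insert v (sB.getD v [] ++ [k]) := rfl
  constructor
  · rw [hmod]; exact PySem.Dict.nodup_keys_insert _ _ _ hnd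
  by_cases cB : sB.contains v = true
  · -- v already present
    obtain ⟨p, hp, hp1⟩ : ∃ p ∈ sB.items, p.1 = v := by
      rw [PySem.Dict.contains_iff_mem_keys] at cB
      simp only [PySem.Dict.keys, List.mem_map] at cB
      obtain ⟨p, hp, hp1⟩ := cB
      exact ⟨p, hp, hp1⟩
    have hpv : (v, p.2) ∈ sB.items := by rw [← hp1]; simpa using hp
    have hgB : sB.getD v [] = p.2 := PySem.Dict.getD_of_mem_items sB hpv hnd []
    have hgA : sA.getD v [] = p.2.take 30 := by
      have hmem : (v, p.2.take 30) ∈ sA.items := by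
        rw [h]; exact List.mem_map.mpr ⟨p, hp, by simp [pvTrunc, hp1]⟩
      exact PySem.Dict.getD_of_mem_items sA hmem hndA []
    have hval : ∀ q ∈ sB.items, q.1 = v → q.2 = p.2 := by
      intro q hq hq1
      have hqv : (v, q.2) ∈ sB.items := by rw [← hq1]; simpa using hq
      have h1 := PySem.Dict.get?_of_mem_items sB hqv hnd
      have h2 := PySem.Dict.get?_of_mem_items sB hpv hnd
      rw [h1] at h2; exact Option.some.inj h2
    rw [hmod, PySem.Dict.items_insert_of_contains _ _ cB]
    unfold swapAStep
    rw [hcont, if_pos cB, hgA, hgB]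
    by_cases clen : (p.2.take 30).length < 30
    · have hlen : p.2.length < 30 := by simp [List.length_take] at clen; omega
      rw [if_pos clen, PySem.Dict.items_insert_of_contains _ _ (hcont ▸ cB), h,
        List.map_map, List.map_map]
      apply List.map_congr_left
      intro q hq
      by_cases hq1 : q.1 = v
      · have := hval q hq hq1
        have h30 : List.take 30 p.2 = p.2 := List.take_of_length_le (Nat.le_of_lt hlen)
        have hk : List.take (30 - p.2.length) [k] = [k] :=
          List.take_of_length_le (by simp; omega)
        simp [pvTrunc, hq1, this, List.take_append, h30, hk]
      · simp [pvTrunc, hq1]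
    · have hlen : ¬ p.2.length < 30 := by simp [List.length_take] at clen; omega
      rw [if_neg clen, h, List.map_map]
      apply List.map_congr_left
      intro q hq
      by_cases hq1 : q.1 = v
      · have := hval q hq hq1
        simp [pvTrunc, hq1, this, List.take_append, show 30 - p.2.length = 0 by omega]
      · simp [pvTrunc, hq1]
  · -- v fresh
    have cB' : sB.contains v = false := by simpa using cB
    have hgB : sB.getD v [] = [] := PySem.Dict.getD_of_not_contains _ _ cB'
    rw [hmod, hgB, PySem.Dict.items_insert_of_not_contains _ _ cB']
    unfold swapAStep
    rw [hcont, cB', if_neg (by simp), PySem.Dict.items_insert_of_not_contains _ _ (by rw [hcont]; exact cB'), h]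
    simp [pvTrunc]

theorem pv_invariant :
    ∀ (ps : List (String × String)) (sA sB : PySem.Dict String (List String)),
      sB.keys.Nodup → sA.items = sB.items.map pvTrunc →
      (ps.foldl (fun s p => s.modify p.2 [] (fun ks => ks ++ [p.1])) sB).keys.Nodup ∧
        ps.foldl (fun s p => swapAStep p.1 s p.2) sA
          = PySem.Dict.mk ((ps.foldl (fun s p => s.modify p.2 [] (fun ks => ks ++ [p.1])) sB).items.map pvTrunc) := by
  intro ps
  induction ps with
  | nil =>
      intro sA sB hnd h
      refine ⟨hnd, ?_⟩
      apply PySem.Dict.ext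
      simpa using h
  | cons q t ih =>
      intro sA sB hnd h
      obtain ⟨hnd1, h1⟩ := pv_step q.1 q.2 sA sB hnd h
      simpa using ih (swapAStep q.1 sA q.2) (sB.modify q.2 [] (fun ks => ks ++ [q.1])) hnd1 h1

theorem pv_flatten {σ : Type} (f : σ → String → String → σ) :
    ∀ (l : List (String × List String)) (e : σ),
      l.foldl (fun sw kv => kv.2.foldl (fun s v => f s kv.1 v) sw) e
        = (l.flatMap (fun kv => kv.2.map (fun v => (kv.1, v)))).foldl
            (fun s p => f s p.1 p.2) e := by
  intro l
  induction l with
  | nil => intro e; rfl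
  | cons kv t ih =>
      intro e
      simp only [List.foldl_cons, List.flatMap_cons, List.foldl_append, List.foldl_map]
      exact ih _

-- the uncapped grouping fold, characterised as B's flatten-then-group-by (uncapped)
theorem pv_group :
    ∀ (ps : List (String × String)),
      (ps.foldl (fun s p => s.modify p.2 [] (fun ks => ks ++ [p.1])) PySem.Dict.empty).items
        = (PySem.List.dedup (ps.map Prod.snd)).map
            (fun v => (v, (ps.filter (fun q => q.2 == v)).map Prod.fst)) := by
  intro ps
  induction ps using List.reverseRecOn with
  | nil => rfl
  | append_singleton l p ih =>
      have hkeys : (l.foldl (fun s p => s.modify p.2 [] (fun ks => ks ++ [p.1])) PySem.Dict.empty).keys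
          = PySem.List.dedup (l.map Prod.snd) := by
        simp only [PySem.Dict.keys, ih, List.map_map]
        exact List.map_id _
      have hnd : (l.foldl (fun s p => s.modify p.2 [] (fun ks => ks ++ [p.1])) PySem.Dict.empty).keys.Nodup := by
        rw [hkeys]; exact PySem.List.nodup_dedup _
      set D := l.foldl (fun s p => s.modify p.2 [] (fun ks => ks ++ [p.1])) PySem.Dict.empty with hD
      have hdd : PySem.List.dedup ((l ++ [p]).map Prod.snd)
          = PySem.Set.add (PySem.List.dedup (l.map Prod.snd)) p.2 := by
        simp only [List.map_append, PySem.List.dedup_eq_ofList, PySem.Set.ofList_eq_foldl,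
          List.foldl_append]
        rfl
      rw [List.foldl_append, List.foldl_cons, List.foldl_nil, hdd]
      have hmod : D.modify p.2 [] (fun ks => ks ++ [p.1])
          = D.insert p.2 (D.getD p.2 [] ++ [p.1]) := rfl
      by_cases hc : p.2 ∈ PySem.List.dedup (l.map Prod.snd)
      · -- value already seen
        have hcont : D.contains p.2 = true := by
          rw [PySem.Dict.contains_eq_decide_mem_keys, hkeys]; simpa using hc
        have hmem : (p.2, (l.filter (fun q => q.2 == p.2)).map Prod.fst) ∈ D.items := by
          rw [ih]; exact List.mem_map.mpr ⟨p.2, hc, rfl⟩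
        have hgD : D.getD p.2 [] = (l.filter (fun q => q.2 == p.2)).map Prod.fst :=
          PySem.Dict.getD_of_mem_items D hmem hnd []
        have hx : ∃ a, (a, p.2) ∈ l := by
          have hm := (PySem.List.mem_dedup _ _).mp hc
          obtain ⟨q, hq, hq2⟩ := List.mem_map.mp hm
          exact ⟨q.1, by rw [show (q.1, p.2) = q from by rw [← hq2]]; exact hq⟩
        have hadd : PySem.Set.add (PySem.List.dedup (l.map Prod.snd)) p.2
            = PySem.List.dedup (l.map Prod.snd) := by
          simp [PySem.Set.add, PySem.Set.contains]
          exact hx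
        rw [hmod, hgD, PySem.Dict.items_insert_of_contains _ _ hcont, hadd, ih, List.map_map]
        apply List.map_congr_left
        intro w hw
        by_cases hwv : w = p.2
        · subst hwv
          simp [List.filter_append]
        · simp only [Function.comp]
          rw [if_neg (by simpa using Ne.symm (fun e => hwv e.symm))]
          simp only [List.filter_append]
          have hb : (p.2 == w) = false := beq_eq_false_iff_ne.mpr (fun e => hwv e.symm)
          have : (List.filter (fun q => q.2 == w) [p]) = [] := by
            simp [hb]
          rw [this, List.append_nil]
      · -- fresh value
        have hcont : D.contains p.2 = false := by
          rw [PySem.Dict.contains_eq_decide_mem_keys, hkeys]; simpa using hc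
        have hgD : D.getD p.2 [] = [] := PySem.Dict.getD_of_not_contains _ _ hcont
        have hadd : PySem.Set.add (PySem.List.dedup (l.map Prod.snd)) p.2
            = PySem.List.dedup (l.map Prod.snd) ++ [p.2] := by
          simp [PySem.Set.add, PySem.Set.contains]
          intro x hxl
          exact hc ((PySem.List.mem_dedup _ _).mpr (by simpa using List.mem_map_of_mem hxl (f := Prod.snd)))
        have hnotin : p.2 ∉ l.map Prod.snd := by
          intro hmem; exact hc ((PySem.List.mem_dedup _ _).mpr hmem)
        have hfil : l.filter (fun q => q.2 == p.2) = [] := by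
          apply List.filter_eq_nil_iff.mpr
          intro q hq
          simp only [beq_iff_eq]
          intro e
          exact hnotin (e ▸ List.mem_map_of_mem hq)
        rw [hmod, hgD, PySem.Dict.items_insert_of_not_contains _ _ hcont, hadd, ih,
          List.map_append]
        congr 1
        · apply List.map_congr_left
          intro w hw
          have hwv : ¬ p.2 = w := fun e => hc (e ▸ hw)
          simp only [List.filter_append]
          have hb : (p.2 == w) = false := beq_eq_false_iff_ne.mpr hwv
          have : (List.filter (fun q => q.2 == w) [p]) = [] := by
            simp [hb]
          rw [this, List.append_nil]
        · simp [List.filter_append, hfil]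

-- ===== VERDICT (by name: the statement is the Claim_ definition above) =====
theorem swap_keys_values_spec : Claim_equal_swap_keys_values := by
  intro d _
  unfold Spec_swap_keys_values swap_keys_values swap_keys_values_alt
  dsimp only []
  rw [pv_flatten (fun s k v => swapAStep k s v)]
  obtain ⟨_, h⟩ := pv_invariant (d.flatMap (fun kv => kv.2.map (fun v => (kv.1, v))))
    PySem.Dict.empty PySem.Dict.empty List.nodup_nil rfl
  rw [h]
  show ((d.flatMap (fun kv => kv.2.map (fun v => (kv.1, v)))).foldl
      (fun s p => s.modify p.2 [] (fun ks => ks ++ [p.1])) PySem.Dict.empty).items.map pvTrunc = _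
  rw [pv_group, List.map_map]
  apply List.map_congr_left
  intro w _
  simp [pvTrunc]
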